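-- pv_equiv track=rewrite | github.com/pinggeger/ECT | tokenizer_wrapper.py | reset_dash
-- ===== SOURCE A (Python) =====
-- def reset_dash(word):
--     if word.startswith('#'):
--         type = '#'
--         word = word[1:]
--     elif word.startswith('@'):
--         type = '@'
--         word = word[1:]
--     else:
--         type = ''
--     if '-' in word:
--         words = []
--         isnum = False
--         for w in word.split('-'):
--             if w.isdigit() and isnum:
--                 words[-1] += '-' + w
--             elif w.isdigit():
--                 isnum = True
--                 words.append(w)
--             else:
--                 isnum = False
--                 words.append(w)
--     else:
--         words = word.split()
--     for i in range(len(words)):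
--         words[i] = type + words[i]
--     return words
-- ===== SOURCE B (Python) =====
-- def _group(parts):
--     if not parts:
--         return []
--     head, rest = parts[0], parts[1:]
--     if not head.isdigit():
--         return [head] + _group(rest)
--     run = [head]
--     while rest and rest[0].isdigit():
--         run.append(rest[0])
--         rest = rest[1:]
--     return ['-'.join(run)] + _group(rest)
--
--
-- def reset_dash(word):
--     type = word[:1] if word[:1] in '#@' else ''
--     word = word[len(type):]
--     words = _group(word.split('-')) if '-' in word else word.split()
--     return [type + w for w in words]
-- ===== Notes on version B (the rewrite author's own statement) =====
-- stated objective: simpler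
-- what changed: A's isnum flag state machine that mutates the last list entry while folding over the dash-split parts is replaced by a direct recursive grouping that joins each maximal run of all-digit parts in one step; the hash/at prefix extraction becomes a one-character-slice membership test and the type-prefix loop a comprehension.
import Mathlib
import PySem

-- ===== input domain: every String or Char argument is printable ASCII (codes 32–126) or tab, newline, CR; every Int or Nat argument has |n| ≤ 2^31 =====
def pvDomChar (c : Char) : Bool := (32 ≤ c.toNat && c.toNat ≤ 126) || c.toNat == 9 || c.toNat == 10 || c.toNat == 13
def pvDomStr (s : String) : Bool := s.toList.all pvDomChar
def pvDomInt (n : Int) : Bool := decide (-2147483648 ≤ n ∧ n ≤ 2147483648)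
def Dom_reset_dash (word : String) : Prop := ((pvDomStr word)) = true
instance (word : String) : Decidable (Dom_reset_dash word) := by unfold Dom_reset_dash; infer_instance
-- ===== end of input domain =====

-- B replaces A's isnum state machine (which mutates words[-1]) by a direct recursive
-- grouping of consecutive all-digit parts; objective: simpler/alternative decomposition.

-- ===== PORT A =====
-- Python '+' on str (exact: concatenation of code points)
def pvCat (a b : String) : String := String.ofList (a.toList ++ b.toList)

-- one iteration of A's for-loop over word.split('-'); state = (words, isnum).
-- words[-1] += '-' + w : ported as dropLast ++ [last ++ "-" ++ w]; the empty-words case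
-- (getLastD's default) is unreachable because isnum = true only after an append.
def pvAStep (st : List String × Bool) (w : String) : List String × Bool :=
  if PySem.Str.strIsdigit w && st.2 then
    (st.1.dropLast ++ [pvCat (st.1.getLastD "") (pvCat "-" w)], st.2)
  else if PySem.Str.strIsdigit w then (st.1 ++ [w], true)
  else (st.1 ++ [w], false)

def reset_dash (word : String) : List String :=
  let p : String × String :=
    if PySem.Str.startswith word "#" then ("#", PySem.Str.slice word (some 1) none)
    else if PySem.Str.startswith word "@" then ("@", PySem.Str.slice word (some 1) none)
    else ("", word)
  let words : List String :=
    if PySem.Str.isIn "-" p.2 then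
      (((PySem.Str.split? p.2 "-").getD []).foldl pvAStep ([], false)).1
    else PySem.Str.split₀ p.2
  words.map (fun w => pvCat p.1 w)

-- ===== PORT B =====
-- the while loop of _group: (run collected from the front, remaining rest)
def pvSplitRun : List String → List String × List String
  | [] => ([], [])
  | w :: t =>
    if PySem.Str.strIsdigit w then
      let p := pvSplitRun t
      (w :: p.1, p.2)
    else ([], w :: t)

theorem pvSplitRun_snd_length_le (t : List String) : (pvSplitRun t).2.length ≤ t.length := by
  induction t with
  | nil => simp [pvSplitRun]
  | cons w t ih =>
    simp only [pvSplitRun]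
    split
    · simpa using Nat.le_succ_of_le ih
    · simp

-- _group from Source B
def pvGroup : List String → List String
  | [] => []
  | h :: t =>
    if PySem.Str.strIsdigit h then
      PySem.Str.join "-" (h :: (pvSplitRun t).1) :: pvGroup (pvSplitRun t).2
    else h :: pvGroup t
termination_by l => l.length
decreasing_by
  · exact Nat.lt_succ_of_le (pvSplitRun_snd_length_le t)
  · simp

def reset_dash_alt (word : String) : List String :=
  let s1 := PySem.Str.slice word none (some 1)
  let ty := if PySem.Str.isIn s1 "#@" then s1 else ""
  let rest := PySem.Str.slice word (some (PySem.Str.len ty)) none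
  let words :=
    if PySem.Str.isIn "-" rest then pvGroup ((PySem.Str.split? rest "-").getD [])
    else PySem.Str.split₀ rest
  words.map (fun w => pvCat ty w)

-- ===== PRECONDITION & SPEC =====
def Spec_reset_dash (word : String) (out : List String) : Prop := out = reset_dash_alt word
instance (word : String) (out : List String) : Decidable (Spec_reset_dash word out) := by unfold Spec_reset_dash; infer_instance

-- ===== CLAIM (what is proved, stated in full; the proofs are below) =====
def Claim_equal_reset_dash : Prop := ∀ (word : String), Dom_reset_dash word → Spec_reset_dash word (reset_dash word)

-- ===== LEMMAS AND PROOFS =====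

theorem pvChars_join_merge (sep a b : List Char) (r : List (List Char)) :
    PySem.Chars.join sep ((a ++ sep ++ b) :: r) = PySem.Chars.join sep (a :: b :: r) := by
  cases r with
  | nil =>
    rw [PySem.Chars.join_singleton, PySem.Chars.join_cons_cons, PySem.Chars.join_singleton]
  | cons q r =>
    rw [PySem.Chars.join_cons_cons, PySem.Chars.join_cons_cons, PySem.Chars.join_cons_cons]
    simp

theorem pvJoin_merge (x h : String) (r : List String) :
    PySem.Str.join "-" (pvCat x (pvCat "-" h) :: r) = PySem.Str.join "-" (x :: h :: r) := by
  apply String.toList_inj.mp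
  simp only [PySem.Str.toList_join, List.map_cons, pvCat, String.toList_ofList]
  rw [← List.append_assoc, pvChars_join_merge]

-- the state machine of A, run from either state, produces exactly B's grouping
theorem pvFold_spec (t : List String) :
    (∀ ws, (t.foldl pvAStep (ws, false)).1 = ws ++ pvGroup t) ∧
    (∀ ws x, (t.foldl pvAStep (ws ++ [x], true)).1
        = ws ++ (PySem.Str.join "-" (x :: (pvSplitRun t).1) :: pvGroup (pvSplitRun t).2)) := by
  induction t with
  | nil =>
    constructor
    · intro ws; simp [pvGroup]
    · intro ws x
      simp [pvSplitRun, pvGroup, PySem.Str.join, PySem.Chars.join_singleton]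
  | cons h t ih =>
    constructor
    · intro ws
      by_cases hd : PySem.Chars.strIsdigit h.toList = true
      · rw [List.foldl_cons]
        have : pvAStep (ws, false) h = (ws ++ [h], true) := by
          simp [pvAStep, hd]
        rw [this, ih.2 ws h, pvGroup]
        simp [hd]
      · rw [List.foldl_cons]
        have : pvAStep (ws, false) h = (ws ++ [h], false) := by
          simp [pvAStep, hd]
        rw [this, ih.1 (ws ++ [h]), pvGroup]
        simp [hd]
    · intro ws x
      by_cases hd : PySem.Chars.strIsdigit h.toList = true
      · rw [List.foldl_cons]
        have : pvAStep (ws ++ [x], true) h = (ws ++ [pvCat x (pvCat "-" h)], true) := by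
          simp [pvAStep, hd]
        rw [this, ih.2 ws (pvCat x (pvCat "-" h)), pvJoin_merge]
        simp [pvSplitRun, hd]
      · rw [List.foldl_cons]
        have : pvAStep (ws ++ [x], true) h = ((ws ++ [x]) ++ [h], false) := by
          simp [pvAStep, hd]
        rw [this, ih.1 ((ws ++ [x]) ++ [h])]
        simp [pvSplitRun, pvGroup, hd, PySem.Str.join, PySem.Chars.join_singleton]

-- the two prefix extractions agree: same type tag, same remaining word
theorem pvPrefix_eq (word : String) :
    (if PySem.Str.startswith word "#" then ("#", PySem.Str.slice word (some 1) none)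
     else if PySem.Str.startswith word "@" then ("@", PySem.Str.slice word (some 1) none)
     else ("", word))
    = (let s1 := PySem.Str.slice word none (some 1)
       let ty := if PySem.Str.isIn s1 "#@" then s1 else ""
       (ty, PySem.Str.slice word (some (PySem.Str.len ty)) none)) := by
  obtain ⟨l, rfl⟩ : ∃ l, word = String.ofList l := ⟨word.toList, String.ofList_toList.symm⟩
  cases l with
  | nil => decide
  | cons c cs =>
    have hs1 : PySem.Str.slice (String.ofList (c :: cs)) none (some 1) = String.ofList [c] := by
      simp [PySem.Str.slice, PySem.List.slice_to]
    have hsl : PySem.Str.slice (String.ofList (c :: cs)) (some 1) none = String.ofList cs := by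
      simp [PySem.Str.slice, PySem.List.slice_from]
    have hsl0 : PySem.Str.slice (String.ofList (c :: cs)) (some 0) none = String.ofList (c :: cs) := by
      simp [PySem.Str.slice, PySem.List.slice_from]
    have hsw : ∀ p : Char, PySem.Str.startswith (String.ofList (c :: cs)) (String.ofList [p]) = (c == p) := by
      intro p
      simp [PySem.Str.startswith, PySem.Chars.startswith, List.isPrefixOf, eq_comm]
    have hpound : ("#" : String) = String.ofList ['#'] := by decide
    have hat : ("@" : String) = String.ofList ['@'] := by decide
    have hlen1 : PySem.Str.len (String.ofList [c]) = 1 := by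
      simp [PySem.Str.len]
    have hlen0 : PySem.Str.len "" = 0 := by decide
    have hisin : PySem.Str.isIn (String.ofList [c]) "#@" = (c == '#' || c == '@') := by
      by_cases h1 : c = '#'
      · subst h1; decide
      by_cases h2 : c = '@'
      · subst h2; decide
      have hneg : PySem.Chars.isIn [c] ['#', '@'] = false := by
        rw [PySem.Chars.isIn_eq_false_iff]
        intro hin
        have := hin.subset (List.mem_singleton.mpr rfl)
        simp at this
        tauto
      have ht : ("#@" : String).toList = ['#', '@'] := by decide
      simp only [PySem.Str.isIn, String.toList_ofList, ht, hneg]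
      simp [h1, h2]
    simp only [hs1, hisin]
    by_cases h1 : c = '#'
    · subst h1
      rw [hpound, hsw]
      simp only [beq_self_eq_true, if_pos, Bool.true_or, hlen1, hsl, ← hpound]
    · by_cases h2 : c = '@'
      · subst h2
        rw [hpound, hat, hsw, hsw]
        simp only [beq_self_eq_true, Bool.or_true, if_pos, hlen1, hsl, ← hat]
        simp [hat]
      · rw [hpound, hat, hsw, hsw]
        have e1 : (c == '#') = false := by simp [h1]
        have e2 : (c == '@') = false := by simp [h2]
        simp [e1, e2, hsl0]

theorem pvBody_eq (ty rest : String) :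
    (List.map (fun w => pvCat ty w)
      (if PySem.Str.isIn "-" rest then
        (((PySem.Str.split? rest "-").getD []).foldl pvAStep ([], false)).1
       else PySem.Str.split₀ rest))
    = (List.map (fun w => pvCat ty w)
      (if PySem.Str.isIn "-" rest then pvGroup ((PySem.Str.split? rest "-").getD [])
       else PySem.Str.split₀ rest)) := by
  congr 1
  split
  · simpa using (pvFold_spec ((PySem.Str.split? rest "-").getD [])).1 []
  · rfl

theorem reset_dash_spec : Claim_equal_reset_dash := by
  intro word _
  unfold Spec_reset_dash
  simp only [reset_dash, reset_dash_alt]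
  rw [pvPrefix_eq word]
  simp only
  exact pvBody_eq _ _
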